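-- pv_equiv track=rewrite | github.com/Hexzzard/AlgoritmosV1 | Optimo_grafico.py | ordenar
-- ===== SOURCE A (Python) =====
-- def ordenar(orden):
--     temp = orden[0]
--     indice=0
--     for i in range(len(orden)):
--
--         if orden[i][0]==0 and orden[i][1]==0:
--             return orden[i], i
--         else:
--             if temp[0] >= orden[i][0]:
--
--                 if temp[0] == orden[i][0]:
--                     if temp[1]>= orden[i][1]:
--                         menor = temp
--                 else:
--                     menor = orden[i]
--                     temp = orden[i]
--                     indice = i
--             else:
--                 menor = temp
--     return menor, indice
-- ===== SOURCE B (Python) =====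
-- def ordenar(orden):
--     # Pass 1: early-exit scan for the (0,0) sentinel.
--     for i, p in enumerate(orden):
--         if p[0] == 0 and p[1] == 0:
--             return p, i
--     # Pass 2: first occurrence of the minimal first coordinate.
--     best_i, best_p = 0, orden[0]
--     for i, p in enumerate(orden):
--         if p[0] < best_p[0]:
--             best_i, best_p = i, p
--     return best_p, best_i
-- ===== Notes on version B (the rewrite author's own statement) =====
-- stated objective: simpler
-- what changed: Replaces A's single loop with tangled temp/menor/indice state and nested tie comparisons by two plain passes: an early-exit scan for the (0,0) sentinel, then a straightforward first-occurrence argmin over the first coordinate.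
import Mathlib
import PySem

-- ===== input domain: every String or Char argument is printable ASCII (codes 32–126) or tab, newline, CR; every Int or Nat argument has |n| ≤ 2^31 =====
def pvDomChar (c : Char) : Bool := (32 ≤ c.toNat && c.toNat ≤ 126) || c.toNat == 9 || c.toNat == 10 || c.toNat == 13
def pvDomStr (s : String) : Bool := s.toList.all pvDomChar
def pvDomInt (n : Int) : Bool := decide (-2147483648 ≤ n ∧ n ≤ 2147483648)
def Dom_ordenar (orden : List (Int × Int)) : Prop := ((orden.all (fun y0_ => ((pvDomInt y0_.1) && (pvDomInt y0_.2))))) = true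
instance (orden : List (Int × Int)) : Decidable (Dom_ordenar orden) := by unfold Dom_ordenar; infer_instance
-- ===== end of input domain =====

-- B replaces A's single loop with tangled temp/menor/indice state and nested tie
-- comparisons by two plain passes (early-exit (0,0) scan, then first-occurrence
-- argmin on the first coordinate); objective: simpler, same O(n) cost.

-- ===== PORT A =====
-- A's `for i in range(len(orden))` with `orden[i]` is transcribed as structural
-- recursion over the remaining suffix carrying the index i and the loop state
-- (temp, indice, menor), branches in source order.  Python's `menor` is unbound
-- before the first iteration but is always assigned at i = 0 before any read,
-- so the initial value passed here (temp = orden[0]) is never observed.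
def ordenarLoop (rest : List (Int × Int)) (i : Int) (temp : Int × Int)
    (indice : Int) (menor : Int × Int) : (Int × Int) × Int :=
  match rest with
  | [] => (menor, indice)
  | p :: rs =>
    if p.1 = 0 ∧ p.2 = 0 then (p, i)
    else
      if temp.1 ≥ p.1 then
        if temp.1 = p.1 then
          if temp.2 ≥ p.2 then ordenarLoop rs (i + 1) temp indice temp
          else ordenarLoop rs (i + 1) temp indice menor
        else ordenarLoop rs (i + 1) p i p
      else ordenarLoop rs (i + 1) temp indice temp

def ordenar (orden : List (Int × Int)) : (Int × Int) × Int :=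
  match orden with
  | [] => ((0, 0), 0)   -- Python raises IndexError on orden[0]; excluded by Pre_
  | p0 :: _ => ordenarLoop orden 0 p0 0 p0

-- ===== PORT B =====
-- Pass 1 of Source B: early-exit scan for the (0,0) sentinel.
def findZero : List (Int × Int) → Int → Option ((Int × Int) × Int)
  | [], _ => none
  | p :: rs, i => if p.1 = 0 ∧ p.2 = 0 then some (p, i) else findZero rs (i + 1)

def ordenar_alt (orden : List (Int × Int)) : (Int × Int) × Int :=
  match findZero orden 0 with
  | some r => r
  | none =>
    match orden with
    | [] => ((0, 0), 0)  -- Python raises IndexError on orden[0]; excluded by Pre_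
    | p0 :: _ =>
      -- Pass 2 of Source B: first-occurrence argmin of the first coordinate.
      let b := (PySem.List.enumerate orden).foldl
        (fun (b : Int × (Int × Int)) t => if t.2.1 < b.2.1 then t else b) (0, p0)
      (b.2, b.1)

-- ===== PRECONDITION & SPEC =====
-- Pre_ excludes only the empty list, on which A raises IndexError.
def Pre_ordenar (orden : List (Int × Int)) : Prop := orden ≠ []
instance (orden : List (Int × Int)) : Decidable (Pre_ordenar orden) := by unfold Pre_ordenar; infer_instance
def pvWitness_ordenar : (List (Int × Int)) := [(3, 1), (2, 5)]

def Spec_ordenar (orden : List (Int × Int)) (out : (Int × Int) × Int) : Prop := out = ordenar_alt orden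
instance (orden : List (Int × Int)) (out : (Int × Int) × Int) : Decidable (Spec_ordenar orden out) := by unfold Spec_ordenar; infer_instance

-- ===== CLAIM (what is proved, stated in full; the proofs are below) =====
def Claim_equal_ordenar : Prop := ∀ (orden : List (Int × Int)), Dom_ordenar orden → Pre_ordenar orden → Spec_ordenar orden (ordenar orden)

-- ===== LEMMAS AND PROOFS =====

-- B's second-pass fold, over a suffix, as a function of the start index and accumulator.
def bmin (rest : List (Int × Int)) (i : Int) (b : Int × (Int × Int)) : Int × (Int × Int) :=
  (PySem.List.enumerate rest i).foldl
    (fun (b : Int × (Int × Int)) t => if t.2.1 < b.2.1 then t else b) b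

theorem bmin_nil (i : Int) (b : Int × (Int × Int)) : bmin [] i b = b := rfl

theorem bmin_cons (p : Int × Int) (rs : List (Int × Int)) (i : Int) (b : Int × (Int × Int)) :
    bmin (p :: rs) i b = bmin rs (i + 1) (if p.1 < b.2.1 then (i, p) else b) := by
  simp [bmin, PySem.List.enumerate_cons]

-- If a (0,0) sentinel occurs in the suffix, A's loop (with menor = temp) returns
-- exactly the first one, i.e. findZero's answer.
theorem loop_of_findZero_some (rest : List (Int × Int)) :
    ∀ (i : Int) (temp : Int × Int) (indice : Int) (r : (Int × Int) × Int),
      findZero rest i = some r → ordenarLoop rest i temp indice temp = r := by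
  induction rest with
  | nil => intro i temp indice r h; simp [findZero] at h
  | cons p rs ih =>
    intro i temp indice r h
    by_cases hz : p.1 = 0 ∧ p.2 = 0
    · simp [findZero, hz] at h
      simp [ordenarLoop, hz, h]
    · simp [findZero, hz] at h
      simp only [ordenarLoop, if_neg hz]
      split_ifs with h1 h2 h3 <;> exact ih _ _ _ _ h

-- If no sentinel occurs, A's loop (with menor = temp) computes B's argmin fold.
theorem loop_of_findZero_none (rest : List (Int × Int)) :
    ∀ (i : Int) (temp : Int × Int) (indice : Int),
      findZero rest i = none →
      ordenarLoop rest i temp indice temp =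
        ((bmin rest i (indice, temp)).2, (bmin rest i (indice, temp)).1) := by
  induction rest with
  | nil => intro i temp indice _; simp [ordenarLoop, bmin_nil]
  | cons p rs ih =>
    intro i temp indice h
    by_cases hz : p.1 = 0 ∧ p.2 = 0
    · simp [findZero, hz] at h
    · simp [findZero, hz] at h
      simp only [ordenarLoop, if_neg hz, bmin_cons]
      by_cases h1 : temp.1 ≥ p.1
      · by_cases h2 : temp.1 = p.1
        · -- temp.1 = p.1 : tie, no update on either side
          rw [if_pos h1, if_pos h2,
            if_neg (show ¬ p.1 < (indice, temp).2.1 by change ¬ p.1 < temp.1; omega)]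
          by_cases h3 : temp.2 ≥ p.2
          · rw [if_pos h3]; exact ih _ _ _ h
          · rw [if_neg h3]; exact ih _ _ _ h
        · -- strict decrease : both sides update to (i, p)
          rw [if_pos h1, if_neg h2,
            if_pos (show p.1 < (indice, temp).2.1 by change p.1 < temp.1; omega)]
          exact ih _ _ _ h
      · -- temp.1 < p.1 : no update on either side
        rw [if_neg h1,
          if_neg (show ¬ p.1 < (indice, temp).2.1 by change ¬ p.1 < temp.1; omega)]
        exact ih _ _ _ h

-- ===== VERDICT (by name: the statement is the Claim_ definition above) =====
theorem ordenar_spec : Claim_equal_ordenar := by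
  intro orden _ hpre
  unfold Spec_ordenar
  match orden with
  | [] => exact absurd rfl hpre
  | p0 :: rest =>
    unfold ordenar ordenar_alt
    cases h : findZero (p0 :: rest) 0 with
    | some r => exact loop_of_findZero_some _ 0 p0 0 r h
    | none => exact loop_of_findZero_none _ 0 p0 0 h
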